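-- pv_equiv track=rewrite | github.com/EthanArcher/adventofcode2022 | day06.py | find_start_of_sequence
-- ===== SOURCE A (Python) =====
-- def find_start_of_sequence(line, length):
--     letter_set = set()
--     for i in range(length-1, len(line)):
--         for j in range(length):
--             letter_set.add(line[i - j])
--         if len(letter_set) == length:
--             return i + 1
--         letter_set.clear()
--     return 0
-- ===== SOURCE B (Python) =====
-- def find_start_of_sequence(line, length):
--     start = 0
--     for i in range(len(line)):
--         p = line[start:i].find(line[i])
--         if p != -1:
--             start = start + p + 1
--         if i - start + 1 == length:
--             return i + 1
--     return 0
-- ===== Notes on version B (the rewrite author's own statement) =====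
-- stated objective: faster
-- what changed: Replaces the per-position rebuild of a set of the last `length` characters with a one-pass two-pointer sliding window: a start pointer advances past the previous occurrence of the incoming character, so the answer is the first position where the window reaches size `length`.
import Mathlib
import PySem

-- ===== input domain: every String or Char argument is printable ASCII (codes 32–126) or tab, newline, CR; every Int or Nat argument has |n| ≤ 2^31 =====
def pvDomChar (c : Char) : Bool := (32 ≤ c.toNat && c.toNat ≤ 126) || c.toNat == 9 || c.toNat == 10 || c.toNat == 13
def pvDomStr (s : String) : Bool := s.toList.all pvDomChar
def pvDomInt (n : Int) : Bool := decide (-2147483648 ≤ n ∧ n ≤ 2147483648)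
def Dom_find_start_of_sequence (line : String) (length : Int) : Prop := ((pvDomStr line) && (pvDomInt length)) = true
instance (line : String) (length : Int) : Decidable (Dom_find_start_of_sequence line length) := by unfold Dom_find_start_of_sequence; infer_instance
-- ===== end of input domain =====

-- B replaces A's per-position rebuild of a set of the last `length` characters by a
-- one-pass two-pointer sliding window (objective: faster).

-- ===== PORT A =====
-- 'for i in range(length-1, len(line))': fuel = number of remaining iterations,
-- i = the current Python loop index
def pvALoop (line : String) (length : Int) : Nat → Int → PySem.Set Char → Int
  | 0, _, _ => 0
  | fuel + 1, i, letterSet =>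
    -- inner 'for j in range(length): letter_set.add(line[i - j])'; the index i - j is
    -- always in range on reachable states (proved below), so '.getD' is never the default
    let s := (PySem.List.pyRange 0 length).foldl
      (fun t j => PySem.Set.add t ((PySem.Str.pyGet? line (i - j)).getD 'A')) letterSet
    if PySem.Set.len s = length then i + 1
    else pvALoop line length fuel (i + 1) PySem.Set.empty  -- letter_set.clear()

def find_start_of_sequence (line : String) (length : Int) : Int :=
  pvALoop line length (PySem.Str.len line - (length - 1)).toNat (length - 1) PySem.Set.empty

-- ===== PORT B =====
-- 'for i in range(len(line))': fuel = number of remaining iterations, i = the loop index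
def pvBLoop (line : String) (length : Int) : Nat → Int → Int → Int
  | 0, _, _ => 0
  | fuel + 1, i, start =>
    let c := (PySem.Str.pyGet? line i).getD 'A'   -- line[i]; i < len(line), never default
    let p := PySem.Str.find (PySem.Str.slice line (some start) (some i)) (String.ofList [c])
    let start' := if p ≠ -1 then start + p + 1 else start
    if i - start' + 1 = length then i + 1 else pvBLoop line length fuel (i + 1) start'

def find_start_of_sequence_alt (line : String) (length : Int) : Int :=
  pvBLoop line length (PySem.Str.len line).toNat 0 0

-- ===== PRECONDITION & SPEC =====
def Spec_find_start_of_sequence (line : String) (length : Int) (out : Int) : Prop := out = find_start_of_sequence_alt line length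
instance (line : String) (length : Int) (out : Int) : Decidable (Spec_find_start_of_sequence line length out) := by unfold Spec_find_start_of_sequence; infer_instance

-- ===== CLAIM (what is proved, stated in full; the proofs are below) =====
def Claim_equal_find_start_of_sequence : Prop := ∀ (line : String) (length : Int), Dom_find_start_of_sequence line length → Spec_find_start_of_sequence line length (find_start_of_sequence line length)

-- ===== LEMMAS AND PROOFS =====

-- the window of characters at positions s, s+1, …, m-1
def pvWin (l : List Char) (s m : Nat) : List Char := (l.drop s).take (m - s)

-- 'the length-k window ending at position m (exclusive) exists and is all-distinct'
def pvGoodB (l : List Char) (k : Nat) (m : Nat) : Bool :=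
  decide (k ≤ m) && decide (m ≤ l.length) && decide ((pvWin l (m - k) m).Nodup)

-- the Nat-level content of B's per-step start update
def pvNext (l : List Char) (j s : Nat) : Nat :=
  let p := PySem.Chars.find (pvWin l s j) [l.getD j 'A']
  if p ≠ -1 then s + p.toNat + 1 else s

-- ---- generic list facts ----

lemma pvSingleton_prefix {c : Char} {ys : List Char} : [c] <+: ys ↔ ys.head? = some c := by
  cases ys with
  | nil => simp
  | cons y t => simp [List.cons_prefix_cons, eq_comm]

lemma pvSingleton_infix {c : Char} {ys : List Char} : [c] <:+: ys ↔ c ∈ ys := by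
  constructor
  · intro h; exact h.subset (List.mem_singleton_self c)
  · intro h
    obtain ⟨u, v, rfl⟩ := List.mem_iff_append.mp h
    exact ⟨u, v, by simp⟩

lemma pvNodupConcat {w : List Char} {c : Char} (h : w.Nodup) (hc : c ∉ w) : (w ++ [c]).Nodup := by
  rw [List.nodup_append]
  exact ⟨h, List.nodup_singleton c, fun a ha b hb hab => by
    simp only [List.mem_singleton] at hb; exact hc (hb ▸ hab ▸ ha)⟩

lemma pvOfList_len_eq_iff (xs : List Char) :
    ((PySem.Set.ofList xs).length = xs.length) ↔ xs.Nodup := by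
  induction xs using List.reverseRecOn with
  | nil => simp [PySem.Set.ofList]
  | append_singleton xs x ih =>
    rw [PySem.Set.ofList_append_singleton]
    by_cases hx : x ∈ xs
    · rw [PySem.Set.add_of_mem ((PySem.Set.mem_ofList xs x).mpr hx)]
      have h1 := PySem.Set.length_ofList_le xs
      apply iff_of_false
      · rw [List.length_append]; simp; omega
      · intro h
        exact (List.nodup_append.mp h).2.2 x hx x (List.mem_singleton_self x) rfl
    · rw [PySem.Set.add_of_not_mem (fun hc => hx ((PySem.Set.mem_ofList xs x).mp hc))]
      rw [List.length_append, List.length_append, List.nodup_append]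
      simp only [List.length_singleton]
      constructor
      · intro h
        have h2 : (PySem.Set.ofList xs).length = xs.length := by omega
        refine ⟨ih.mp h2, List.nodup_singleton x, fun a ha b hb hab => ?_⟩
        simp only [List.mem_singleton] at hb
        exact hx (hb ▸ hab ▸ ha)
      · rintro ⟨h1, -, -⟩
        have := ih.mpr h1
        omega

lemma pvFind?_append_none {p : Nat → Bool} {xs ys : List Nat} (h : xs.find? p = none) :
    (xs ++ ys).find? p = ys.find? p := by
  induction xs with
  | nil => simp
  | cons a t ih =>
    rw [List.find?_cons] at h
    cases hpa : p a
    · rw [hpa] at h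
      rw [List.cons_append, List.find?_cons, hpa]
      exact ih h
    · rw [hpa] at h
      simp at h

-- ---- window facts ----

lemma pvWin_length (l : List Char) {s m : Nat} (hm : m ≤ l.length) :
    (pvWin l s m).length = m - s := by
  unfold pvWin
  rw [List.length_take, List.length_drop]
  omega

lemma pvWin_getElem (l : List Char) {s m t : Nat} (hm : m ≤ l.length) (ht : t < m - s) :
    (pvWin l s m)[t]'(by rw [pvWin_length l hm]; exact ht) = l.getD (s + t) 'A' := by
  unfold pvWin
  rw [List.getElem_take, List.getElem_drop,
    List.getD_eq_getElem l 'A' (show s + t < l.length by omega)]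

lemma pvWin_succ (l : List Char) {s j : Nat} (hs : s ≤ j) (hj : j < l.length) :
    pvWin l s (j + 1) = pvWin l s j ++ [l.getD j 'A'] := by
  unfold pvWin
  have h1 : j + 1 - s = (j - s) + 1 := by omega
  rw [h1, List.take_add_one]
  congr 1
  rw [List.getElem?_drop, show s + (j - s) = j by omega, List.getElem?_eq_getElem hj,
    List.getD_eq_getElem l 'A' hj]
  rfl

lemma pvWin_drop (l : List Char) (s t m : Nat) :
    pvWin l (s + t) m = (pvWin l s m).drop t := by
  unfold pvWin
  rw [List.drop_take, List.drop_drop, Nat.sub_sub]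

lemma pvNotNodup (l : List Char) {s m : Nat} (hm : m ≤ l.length) (_hs : s ≤ m) (_h0 : s ≠ 0)
    (hmem : l.getD (s - 1) 'A' ∈ pvWin l s m) :
    ∀ {s'' : Nat}, s'' < s → ¬ (pvWin l s'' m).Nodup := by
  intro s'' hlt hnod
  have hw : (pvWin l s m).length = m - s := pvWin_length l hm
  obtain ⟨t, ht, hteq⟩ := List.mem_iff_getElem.mp hmem
  have ht' : t < m - s := by rw [hw] at ht; exact ht
  have htv : l.getD (s + t) 'A' = l.getD (s - 1) 'A' := by
    rw [← pvWin_getElem l hm ht']; exact hteq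
  have ha : s - 1 - s'' < m - s'' := by omega
  have hb : s - s'' + t < m - s'' := by omega
  have hval_a : (pvWin l s'' m)[s - 1 - s'']'(by rw [pvWin_length l hm]; exact ha)
      = l.getD (s - 1) 'A' := by
    rw [pvWin_getElem l hm ha, show s'' + (s - 1 - s'') = s - 1 by omega]
  have hval_b : (pvWin l s'' m)[s - s'' + t]'(by rw [pvWin_length l hm]; exact hb)
      = l.getD (s - 1) 'A' := by
    rw [pvWin_getElem l hm hb, show s'' + (s - s'' + t) = s + t by omega]
    exact htv
  have := (List.Nodup.getElem_inj_iff hnod).mp (hval_a.trans hval_b.symm)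
  omega

-- ---- B's step preserves the sliding-window invariant ----

lemma pvStep_inv (l : List Char) {j s : Nat} (hj : j < l.length) (hs : s ≤ j)
    (hnd : (pvWin l s j).Nodup)
    (hanc : s ≠ 0 → l.getD (s - 1) 'A' ∈ pvWin l s j) :
    s ≤ pvNext l j s ∧ pvNext l j s ≤ j ∧ (pvWin l (pvNext l j s) (j + 1)).Nodup ∧
      (pvNext l j s ≠ 0 → l.getD (pvNext l j s - 1) 'A' ∈ pvWin l (pvNext l j s) (j + 1)) := by
  have hjle : j ≤ l.length := le_of_lt hj
  have hw : (pvWin l s j).length = j - s := pvWin_length l hjle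
  unfold pvNext
  by_cases hp : PySem.Chars.find (pvWin l s j) [l.getD j 'A'] = -1
  · rw [if_neg (not_not_intro hp)]
    have hcnot : l.getD j 'A' ∉ pvWin l s j := fun hc =>
      ((PySem.Chars.find_eq_neg_one_iff _ _).mp hp) (pvSingleton_infix.mpr hc)
    refine ⟨le_refl s, hs, ?_, ?_⟩
    · rw [pvWin_succ l hs hj]
      exact pvNodupConcat hnd hcnot
    · intro h0
      rw [pvWin_succ l hs hj]
      exact List.mem_append_left _ (hanc h0)
  · have hple := PySem.Chars.neg_one_le_find (pvWin l s j) [l.getD j 'A']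
    have hp0 : 0 ≤ PySem.Chars.find (pvWin l s j) [l.getD j 'A'] := by omega
    obtain ⟨hpre, hmin⟩ := PySem.Chars.find_spec hp0
    rw [if_pos hp]
    set q := (PySem.Chars.find (pvWin l s j) [l.getD j 'A']).toNat with hqdef
    have hq? : (pvWin l s j)[q]? = some (l.getD j 'A') := by
      rw [← List.head?_drop]; exact pvSingleton_prefix.mp hpre
    obtain ⟨hqlt, hwq⟩ := List.getElem?_eq_some_iff.mp hq?
    have hqj : q < j - s := by rw [hw] at hqlt; exact hqlt
    have hnew : pvWin l (s + q + 1) (j + 1) = (pvWin l s j).drop (q + 1) ++ [l.getD j 'A'] := by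
      rw [pvWin_succ l (show s + q + 1 ≤ j by omega) hj]
      congr 1
      rw [show s + q + 1 = s + (q + 1) by omega, pvWin_drop]
    have hcnotdrop : l.getD j 'A' ∉ (pvWin l s j).drop (q + 1) := by
      intro hc
      obtain ⟨t, ht, hteq⟩ := List.mem_iff_getElem.mp hc
      rw [List.getElem_drop] at hteq
      have hb : q + 1 + t < (pvWin l s j).length := by rw [List.length_drop] at ht; omega
      have := (List.Nodup.getElem_inj_iff hnd).mp (hteq.trans hwq.symm)
      omega
    refine ⟨by omega, by omega, ?_, ?_⟩
    · rw [hnew]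
      exact pvNodupConcat (hnd.sublist (List.drop_sublist _ _)) hcnotdrop
    · intro _
      rw [hnew, show s + q + 1 - 1 = s + q by omega]
      have hv : l.getD (s + q) 'A' = l.getD j 'A' := by
        rw [← hwq, pvWin_getElem l hjle hqj]
      rw [hv]
      exact List.mem_append_right _ (List.mem_singleton_self _)

-- the Int computation performed by pvBLoop's step is pvNext
lemma pvNext_int (line : String) {j s : Nat} (hj : j < line.toList.length) (_hs : s ≤ j) :
    (if PySem.Str.find (PySem.Str.slice line (some (s : Int)) (some (j : Int)))
          (String.ofList [(PySem.Str.pyGet? line (j : Int)).getD 'A']) ≠ -1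
     then (s : Int) + PySem.Str.find (PySem.Str.slice line (some (s : Int)) (some (j : Int)))
          (String.ofList [(PySem.Str.pyGet? line (j : Int)).getD 'A']) + 1
     else (s : Int)) = ((pvNext line.toList j s : Nat) : Int) := by
  have hget : (PySem.Str.pyGet? line (j : Int)).getD 'A' = line.toList.getD j 'A' := by
    rw [PySem.Str.pyGet?_natCast, List.getElem?_eq_getElem hj, Option.getD_some,
      List.getD_eq_getElem _ _ hj]
  have hsl : (PySem.Str.slice line (some (s : Int)) (some (j : Int))).toList
      = pvWin line.toList s j := by
    rw [PySem.Str.toList_slice, PySem.Chars.slice_eq_listSlice, PySem.List.slice_natCast]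
    rfl
  rw [hget]
  rw [show PySem.Str.find (PySem.Str.slice line (some (s : Int)) (some (j : Int)))
        (String.ofList [line.toList.getD j 'A'])
      = PySem.Chars.find (pvWin line.toList s j) [line.toList.getD j 'A'] by
    rw [PySem.Str.find_eq, hsl, String.toList_ofList]]
  unfold pvNext
  by_cases hp : PySem.Chars.find (pvWin line.toList s j) [line.toList.getD j 'A'] = -1
  · rw [if_neg (not_not_intro hp), if_neg (not_not_intro hp)]
  · have hple := PySem.Chars.neg_one_le_find (pvWin line.toList s j) [line.toList.getD j 'A']
    have hpnn : (0 : Int) ≤ PySem.Chars.find (pvWin line.toList s j) [line.toList.getD j 'A'] := by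
      omega
    rw [if_pos hp, if_pos hp]
    push_cast
    rw [Int.toNat_of_nonneg hpnn]
-- ---- B's loop computes pvFirst-from-j ----

lemma pvB_run (line : String) (k : Nat) (_hk : 1 ≤ k) :
    ∀ (d j s : Nat), line.toList.length - j = d → s ≤ j → j ≤ line.toList.length →
    (pvWin line.toList s j).Nodup →
    (s ≠ 0 → line.toList.getD (s - 1) 'A' ∈ pvWin line.toList s j) →
    j - s < k →
    pvBLoop line (k : Int) d (j : Int) (s : Int)
      = (match (List.range' (j + 1) (line.toList.length - j)).find? (pvGoodB line.toList k) with
         | some m => (m : Int) | none => 0) := by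
  intro d
  induction d with
  | zero =>
    intro j s hd hs hjn hnd hanc hsize
    rw [hd, List.range'_zero]
    simp [pvBLoop]
  | succ d ih =>
    intro j s hd hs hjn hnd hanc hsize
    have hj : j < line.toList.length := by omega
    simp only [pvBLoop]
    rw [pvNext_int line hj hs]
    obtain ⟨hss', hs'j, hnd', hanc'⟩ := pvStep_inv line.toList hj hs hnd hanc
    have hiff : (pvGoodB line.toList k (j + 1) = true) ↔ j + 1 - pvNext line.toList j s = k := by
      constructor
      · intro hgt
        simp only [pvGoodB, Bool.and_eq_true, decide_eq_true_eq] at hgt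
        obtain ⟨⟨hk1, hk2⟩, hnd2⟩ := hgt
        by_contra hne
        have hlt : j + 1 - k < pvNext line.toList j s := by omega
        have h0' : pvNext line.toList j s ≠ 0 := by omega
        exact pvNotNodup line.toList (show j + 1 ≤ line.toList.length by omega)
          (by omega) h0' (hanc' h0') hlt hnd2
      · intro he
        simp only [pvGoodB, Bool.and_eq_true, decide_eq_true_eq]
        refine ⟨⟨by omega, by omega⟩, ?_⟩
        rw [show j + 1 - k = pvNext line.toList j s by omega]
        exact hnd'
    rw [show line.toList.length - j = (line.toList.length - (j + 1)) + 1 by omega,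
      List.range'_succ, List.find?_cons]
    by_cases hg : pvGoodB line.toList k (j + 1) = true
    · rw [if_pos (show (j : Int) - (pvNext line.toList j s : Int) + 1 = (k : Int) by
        have := hiff.mp hg; omega)]
      rw [hg]
      push_cast
      ring
    · rw [Bool.not_eq_true] at hg
      rw [hg]
      rw [if_neg (show ¬ ((j : Int) - (pvNext line.toList j s : Int) + 1 = (k : Int)) by
        intro he
        have : j + 1 - pvNext line.toList j s = k := by omega
        rw [hiff.mpr this] at hg
        simp at hg)]
      rw [show ((j : Int) + 1) = ((j + 1 : Nat) : Int) by push_cast; ring]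
      exact ih (j + 1) (pvNext line.toList j s) (by omega) (by omega) (by omega) hnd' hanc'
        (by
          have hne : ¬ (j + 1 - pvNext line.toList j s = k) := fun h => by
            rw [hiff.mpr h] at hg; simp at hg
          omega)

-- ---- A's loop computes pvFirst-from-j ----

lemma pvA_inner (line : String) (k : Nat) (hk : 1 ≤ k) {j : Nat}
    (hjk : k ≤ j + 1) (hj : j < line.toList.length) :
    ((PySem.List.pyRange 0 (k : Int)).foldl
        (fun t jj => PySem.Set.add t ((PySem.Str.pyGet? line ((j : Int) - jj)).getD 'A'))
        PySem.Set.empty : PySem.Set Char)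
      = PySem.Set.ofList (pvWin line.toList (j + 1 - k) (j + 1)).reverse := by
  rw [← PySem.Set.update_map_eq_foldl_add, PySem.Set.update_empty]
  congr 1
  have hwlen : (pvWin line.toList (j + 1 - k) (j + 1)).length = k := by
    rw [pvWin_length _ (by omega)]; omega
  apply List.ext_getElem
  · rw [List.length_map, PySem.List.length_pyRange_one, List.length_reverse, hwlen]
    simp
  · intro t h1 h2
    have ht : t < k := by
      rw [List.length_map, PySem.List.length_pyRange_one] at h1
      simpa using h1
    rw [List.getElem_map, PySem.List.getElem_pyRange_one]
    rw [show (0 : Int) + (t : Int) = ((t : Nat) : Int) by ring]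
    rw [show (j : Int) - (t : Int) = ((j - t : Nat) : Int) by omega,
      PySem.Str.pyGet?_natCast, List.getElem?_eq_getElem (show j - t < _ by omega),
      Option.getD_some]
    rw [List.getElem_reverse]
    simp only [hwlen]
    rw [pvWin_getElem line.toList (show j + 1 ≤ _ by omega) (show k - 1 - t < j + 1 - (j + 1 - k) by omega)]
    rw [show j + 1 - k + (k - 1 - t) = j - t by omega]
    rw [List.getD_eq_getElem _ _ (show j - t < _ by omega)]

lemma pvA_run (line : String) (k : Nat) (hk : 1 ≤ k) :
    ∀ (d j : Nat), line.toList.length - j = d → k ≤ j + 1 →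
    pvALoop line (k : Int) d (j : Int) PySem.Set.empty
      = (match (List.range' (j + 1) (line.toList.length - j)).find? (pvGoodB line.toList k) with
         | some m => (m : Int) | none => 0) := by
  intro d
  induction d with
  | zero =>
    intro j hd hjk
    rw [hd, List.range'_zero]
    simp [pvALoop]
  | succ d ih =>
    intro j hd hjk
    have hj : j < line.toList.length := by omega
    simp only [pvALoop]
    rw [pvA_inner line k hk hjk hj]
    have hwlen : (pvWin line.toList (j + 1 - k) (j + 1)).reverse.length = k := by
      rw [List.length_reverse, pvWin_length _ (by omega)]; omega
    have hiff : (PySem.Set.len (PySem.Set.ofList (pvWin line.toList (j + 1 - k) (j + 1)).reverse) = (k : Int))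
        ↔ pvGoodB line.toList k (j + 1) = true := by
      have h1 : PySem.Set.len (PySem.Set.ofList (pvWin line.toList (j + 1 - k) (j + 1)).reverse)
          = ((PySem.Set.ofList (pvWin line.toList (j + 1 - k) (j + 1)).reverse).length : Int) := by
        simp [PySem.Set.len]
      rw [h1]
      have h2 := pvOfList_len_eq_iff (pvWin line.toList (j + 1 - k) (j + 1)).reverse
      rw [hwlen] at h2
      simp only [pvGoodB, Bool.and_eq_true, decide_eq_true_eq]
      constructor
      · intro h
        refine ⟨⟨by omega, by omega⟩, ?_⟩
        rw [← List.nodup_reverse]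
        exact h2.mp (by omega)
      · rintro ⟨-, hnd⟩
        have := h2.mpr (List.nodup_reverse.mpr hnd)
        omega
    rw [show line.toList.length - j = (line.toList.length - (j + 1)) + 1 by omega,
      List.range'_succ, List.find?_cons]
    by_cases hg : pvGoodB line.toList k (j + 1) = true
    · rw [if_pos (hiff.mpr hg), hg]
      push_cast
      ring
    · rw [Bool.not_eq_true] at hg
      rw [hg]
      rw [if_neg (fun h => by rw [hiff.mp h] at hg; simp at hg)]
      rw [show ((j : Int) + 1) = ((j + 1 : Nat) : Int) by push_cast; ring]
      exact ih (j + 1) (by omega) (by omega)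

-- ---- degenerate lengths: both return 0 ----

lemma pvA_neg (line : String) (length : Int) (hneg : length < 0) :
    ∀ (fuel : Nat) (i : Int), pvALoop line length fuel i PySem.Set.empty = 0 := by
  intro fuel
  induction fuel with
  | zero => intro i; simp [pvALoop]
  | succ fuel ih =>
    intro i
    simp only [pvALoop]
    rw [PySem.List.pyRange_one_eq_nil (le_of_lt hneg)]
    simp only [List.foldl_nil]
    rw [if_neg (by simp [PySem.Set.len, PySem.Set.empty]; omega)]
    exact ih (i + 1)

lemma pvB_nonpos (line : String) (length : Int) (hle : length ≤ 0) :
    ∀ (d j s : Nat), line.toList.length - j = d → s ≤ j → j ≤ line.toList.length →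
    (pvWin line.toList s j).Nodup →
    (s ≠ 0 → line.toList.getD (s - 1) 'A' ∈ pvWin line.toList s j) →
    pvBLoop line length d (j : Int) (s : Int) = 0 := by
  intro d
  induction d with
  | zero =>
    intro j s hd hs hjn hnd hanc
    simp [pvBLoop]
  | succ d ih =>
    intro j s hd hs hjn hnd hanc
    have hj : j < line.toList.length := by omega
    simp only [pvBLoop]
    rw [pvNext_int line hj hs]
    obtain ⟨hss', hs'j, hnd', hanc'⟩ := pvStep_inv line.toList hj hs hnd hanc
    rw [if_neg (show ¬ ((j : Int) - (pvNext line.toList j s : Int) + 1 = length) by omega)]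
    rw [show ((j : Int) + 1) = ((j + 1 : Nat) : Int) by push_cast; ring]
    exact ih (j + 1) (pvNext line.toList j s) (by omega) (by omega) (by omega) hnd' hanc'

-- ===== VERDICT (by name: the statement is the Claim_ definition above) =====
theorem find_start_of_sequence_spec : Claim_equal_find_start_of_sequence := by
  intro line length _
  unfold Spec_find_start_of_sequence find_start_of_sequence find_start_of_sequence_alt
  have hlen : PySem.Str.len line = ((line.toList.length : Nat) : Int) := by simp
  rw [hlen]
  by_cases h1 : 1 ≤ length
  · have hkl : length = ((length.toNat : Nat) : Int) := by omega
    set k := length.toNat with hkdef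
    have hk1 : 1 ≤ k := by omega
    rw [hkl]
    rw [show ((line.toList.length : Int) - ((k : Int) - 1)).toNat = line.toList.length - (k - 1) by omega]
    rw [show (k : Int) - 1 = ((k - 1 : Nat) : Int) by omega]
    rw [pvA_run line k hk1 (line.toList.length - (k - 1)) (k - 1) rfl (by omega)]
    rw [show ((line.toList.length : Nat) : Int).toNat = line.toList.length by simp]
    have hB := pvB_run line k hk1 line.toList.length 0 0 (by omega) (le_refl 0) (by omega)
      (by simp [pvWin]) (fun h => absurd rfl h) (by omega)
    simp only [Nat.cast_zero] at hB
    rw [hB]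
    rw [show (k - 1) + 1 = k by omega, show (0 : Nat) + 1 = 1 by omega,
      Nat.sub_zero]
    by_cases hn : line.toList.length ≤ k - 1
    · have hnone : (List.range' 1 line.toList.length).find? (pvGoodB line.toList k) = none :=
        List.find?_eq_none.mpr (fun m hm => by
          have := List.mem_range'_1.mp hm
          simp only [pvGoodB, Bool.and_eq_true, decide_eq_true_eq]
          rintro ⟨⟨h1, h2⟩, -⟩
          omega)
      rw [show line.toList.length - (k - 1) = 0 by omega, List.range'_zero, List.find?_nil, hnone]
    · have hsplit : List.range' 1 line.toList.length
          = List.range' 1 (k - 1) ++ List.range' k (line.toList.length - (k - 1)) := by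
        have h := List.range'_append (s := 1) (m := k - 1) (n := line.toList.length - (k - 1)) (step := 1)
        simp only [one_mul] at h
        rw [show 1 + (k - 1) = k by omega, show (k - 1) + (line.toList.length - (k - 1)) = line.toList.length by omega] at h
        exact h.symm
      rw [hsplit, pvFind?_append_none (List.find?_eq_none.mpr (fun m hm => by
        have := List.mem_range'_1.mp hm
        simp only [pvGoodB, Bool.and_eq_true, decide_eq_true_eq]
        rintro ⟨⟨ha, hb⟩, -⟩
        omega))]
  · have h1' : length ≤ 0 := by omega
    rw [show ((line.toList.length : Nat) : Int).toNat = line.toList.length by simp]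
    have hB := pvB_nonpos line length (by omega) line.toList.length 0 0 rfl (le_refl 0) (by omega)
      (by simp [pvWin]) (fun h => absurd rfl h)
    simp only [Nat.cast_zero] at hB
    rw [hB]
    by_cases h0 : length = 0
    · subst h0
      rw [show (0 : Int) - 1 = (-1 : Int) by ring]
      rw [show ((line.toList.length : Int) - (-1)).toNat = line.toList.length + 1 by omega]
      simp only [pvALoop]
      rw [PySem.List.pyRange_one_eq_nil (le_refl 0)]
      simp only [List.foldl_nil]
      rw [if_pos (by simp [PySem.Set.len, PySem.Set.empty])]
      ring
    · exact pvA_neg line length (by omega) _ _
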